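-- pv_equiv track=rewrite | github.com/ZainTechnologiesLTD/ZAIN-HMS | apps/core/middleware.py | _get_module_name
-- ===== SOURCE A (Python) =====
-- def _get_module_name(path):
--     """Extract user-friendly module name from path"""
--     module_names = {
--         '/dashboard/': 'Dashboard',
--         '/patients/': 'Patient Management',
--         '/appointments/': 'Appointments',
--         '/doctors/': 'Doctor Management',
--         '/nurses/': 'Nurse Management',
--         '/billing/': 'Billing',
--         '/pharmacy/': 'Pharmacy',
--         '/laboratory/': 'Laboratory',
--         '/radiology/': 'Radiology',
--         '/emergency/': 'Emergency',
--         '/opd/': 'OPD',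
--         '/ipd/': 'IPD',
--         '/surgery/': 'Surgery',
--         '/staff/': 'Staff Management',
--         '/inventory/': 'Inventory',
--         '/reports/': 'Reports',
--         '/analytics/': 'Analytics',
--         '/notifications/': 'Notifications',
--     }
--     for prefix, name in module_names.items():
--         if path.startswith(prefix):
--             return name
--     return 'the requested page'
-- ===== SOURCE B (Python) =====
-- def _name_for(seg):
--     match seg:
--         case 'dashboard': return 'Dashboard'
--         case 'patients': return 'Patient Management'
--         case 'appointments': return 'Appointments'
--         case 'doctors': return 'Doctor Management'
--         case 'nurses': return 'Nurse Management'
--         case 'billing': return 'Billing'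
--         case 'pharmacy': return 'Pharmacy'
--         case 'laboratory': return 'Laboratory'
--         case 'radiology': return 'Radiology'
--         case 'emergency': return 'Emergency'
--         case 'opd': return 'OPD'
--         case 'ipd': return 'IPD'
--         case 'surgery': return 'Surgery'
--         case 'staff': return 'Staff Management'
--         case 'inventory': return 'Inventory'
--         case 'reports': return 'Reports'
--         case 'analytics': return 'Analytics'
--         case 'notifications': return 'Notifications'
--         case _: return 'the requested page'
--
--
-- def _get_module_name(path):
--     """Extract user-friendly module name from path"""
--     if path.startswith('/'):
--         seg = []
--         for ch in path[1:]:
--             if ch == '/':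
--                 return _name_for(''.join(seg))
--             seg.append(ch)
--     return 'the requested page'
-- ===== Notes on version B (the rewrite author's own statement) =====
-- stated objective: alternative
-- what changed: Instead of scanning 18 startswith prefix tests, B makes a single pass over the path to cut out the first slash-delimited segment and then dispatches on that segment with one match statement.
import Mathlib
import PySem

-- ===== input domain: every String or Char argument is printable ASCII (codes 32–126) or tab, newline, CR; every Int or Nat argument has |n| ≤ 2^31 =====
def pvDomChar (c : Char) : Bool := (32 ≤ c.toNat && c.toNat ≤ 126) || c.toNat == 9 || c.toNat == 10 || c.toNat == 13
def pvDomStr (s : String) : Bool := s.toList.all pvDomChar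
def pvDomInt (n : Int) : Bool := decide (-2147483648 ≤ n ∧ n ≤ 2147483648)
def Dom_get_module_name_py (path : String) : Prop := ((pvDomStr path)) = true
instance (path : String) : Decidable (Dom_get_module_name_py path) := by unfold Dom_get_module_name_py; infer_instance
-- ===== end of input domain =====

-- B replaces A's 18-way startswith scan by a single pass over the path that cuts out the
-- first slash-delimited segment and dispatches on it (alternative decomposition; return value only).

-- ===== PORT A =====
-- the module-name table (A's dict literal)
def pvPairs : List (String × String) :=
  [("/dashboard/", "Dashboard"),
   ("/patients/", "Patient Management"),
   ("/appointments/", "Appointments"),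
   ("/doctors/", "Doctor Management"),
   ("/nurses/", "Nurse Management"),
   ("/billing/", "Billing"),
   ("/pharmacy/", "Pharmacy"),
   ("/laboratory/", "Laboratory"),
   ("/radiology/", "Radiology"),
   ("/emergency/", "Emergency"),
   ("/opd/", "OPD"),
   ("/ipd/", "IPD"),
   ("/surgery/", "Surgery"),
   ("/staff/", "Staff Management"),
   ("/inventory/", "Inventory"),
   ("/reports/", "Reports"),
   ("/analytics/", "Analytics"),
   ("/notifications/", "Notifications")]

def pvModuleNames : PySem.Dict String String := PySem.Dict.ofList pvPairs

-- A's 'for prefix, name in module_names.items(): if path.startswith(prefix): return name'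
def pvScanA (l : List (String × String)) (path : String) : String :=
  match l with
  | [] => "the requested page"
  | (pre, name) :: rest =>
      if PySem.Str.startswith path pre then name else pvScanA rest path

def get_module_name_py (path : String) : String :=
  pvScanA (PySem.Dict.items pvModuleNames) path

-- ===== PORT B =====
-- Source B's _name_for: match-case on the segment, a sequential chain of equality tests
def pvNameFor (seg : String) : String :=
  if seg == "dashboard" then "Dashboard"
  else if seg == "patients" then "Patient Management"
  else if seg == "appointments" then "Appointments"
  else if seg == "doctors" then "Doctor Management"
  else if seg == "nurses" then "Nurse Management"
  else if seg == "billing" then "Billing"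
  else if seg == "pharmacy" then "Pharmacy"
  else if seg == "laboratory" then "Laboratory"
  else if seg == "radiology" then "Radiology"
  else if seg == "emergency" then "Emergency"
  else if seg == "opd" then "OPD"
  else if seg == "ipd" then "IPD"
  else if seg == "surgery" then "Surgery"
  else if seg == "staff" then "Staff Management"
  else if seg == "inventory" then "Inventory"
  else if seg == "reports" then "Reports"
  else if seg == "analytics" then "Analytics"
  else if seg == "notifications" then "Notifications"
  else "the requested page"

-- Source B's for-loop over path[1:]: collect chars until the next '/', then dispatch
def pvSegLoop (seg : List Char) (rest : List Char) : String :=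
  match rest with
  | [] => "the requested page"
  | c :: cs =>
      if c == '/' then pvNameFor (String.ofList seg) else pvSegLoop (seg ++ [c]) cs

def get_module_name_py_alt (path : String) : String :=
  if PySem.Str.startswith path "/" then
    pvSegLoop [] (PySem.Str.slice path (some 1) none).toList
  else "the requested page"

-- ===== PRECONDITION & SPEC =====
def Spec_get_module_name_py (path : String) (out : String) : Prop := out = get_module_name_py_alt path
instance (path : String) (out : String) : Decidable (Spec_get_module_name_py path out) := by unfold Spec_get_module_name_py; infer_instance

-- ===== CLAIM (what is proved, stated in full; the proofs are below) =====
def Claim_equal_get_module_name_py : Prop := ∀ (path : String), Dom_get_module_name_py path → Spec_get_module_name_py path (get_module_name_py path)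

-- ===== LEMMAS AND PROOFS =====

lemma pvItems : PySem.Dict.items pvModuleNames = pvPairs := by
  have h : pvModuleNames = PySem.Dict.mk pvPairs := by apply PySem.Dict.ext; decide
  rw [h]

lemma pvStartswithChar (path : String) :
    PySem.Str.startswith path "/" = PySem.Chars.startswith path.toList ['/'] := by
  rw [PySem.Str.startswith_eq]
  exact congrArg _ (by decide)

-- a table prefix never matches a path without a leading '/'
lemma pvEntry1 (path p : String) (hstart : PySem.Str.startswith path "/" = false)
    (hshape : p.toList = '/' :: p.toList.tail) :
    PySem.Str.startswith path p = false := by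
  cases h : PySem.Str.startswith path p with
  | false => rfl
  | true =>
    exfalso
    have hp : p.toList <+: path.toList := by
      rw [PySem.Str.startswith_eq] at h
      exact (PySem.Chars.startswith_iff _ _).1 h
    have h1 : ['/'] <+: path.toList :=
      List.IsPrefix.trans (by rw [hshape]; exact ⟨p.toList.tail, rfl⟩) hp
    have ht2 : PySem.Str.startswith path "/" = true := by
      rw [pvStartswithChar]
      exact (PySem.Chars.startswith_iff _ _).2 (by simpa using h1)
    rw [ht2] at hstart
    exact Bool.noConfusion hstart

-- a table prefix never matches when the rest of the path has no second '/'
lemma pvEntry2a (path p : String) (t : List Char) (hcs : path.toList = '/' :: t)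
    (hshape : p.toList = '/' :: ((p.toList.drop 1).dropLast ++ ['/']))
    (hnot : '/' ∉ t) : PySem.Str.startswith path p = false := by
  cases h : PySem.Str.startswith path p with
  | false => rfl
  | true =>
    exfalso
    have hp : p.toList <+: path.toList := by
      rw [PySem.Str.startswith_eq] at h
      exact (PySem.Chars.startswith_iff _ _).1 h
    rw [hshape, hcs, List.cons_prefix_cons] at hp
    have hsub : ((p.toList.drop 1).dropLast ++ ['/']) <+: t := hp.2
    exact hnot (hsub.sublist.subset (by simp))

-- with the first '/' of t at index j: a slash-free s followed by '/' prefixes t iff s = t.take j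
lemma pvTakeIff (t s : List Char) (hs : '/' ∉ s) (j : Nat)
    (hj : t.findIdx? (· == '/') = some j) :
    (s ++ ['/'] <+: t) ↔ s = t.take j := by
  obtain ⟨hlt, hget, hmin⟩ := List.findIdx?_eq_some_iff_getElem.1 hj
  have hjval : t[j] = '/' := by simpa using hget
  have hjget : t[j]? = some '/' := by rw [List.getElem?_eq_getElem hlt, hjval]
  constructor
  · intro hp
    obtain ⟨r, hr⟩ := hp
    have hr' : t = s ++ '/' :: r := by simpa using hr.symm
    have hnotlt : ¬ s.length < j := by
      intro h
      apply hmin s.length h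
      have hsl : s.length < t.length := by omega
      have : t[s.length]? = some '/' := by
        rw [hr', List.getElem?_append_right (le_refl _)]
        simp
      have hv : t[s.length] = '/' := by
        simpa [List.getElem?_eq_getElem hsl] using this
      simp [hv]
    have hnotgt : ¬ j < s.length := by
      intro h
      have hg : t[j]? = s[j]? := by
        rw [hr']
        exact List.getElem?_append_left h
      have hsome : s[j]? = some '/' := by rw [← hg, hjget]
      have hval : s[j] = '/' := by simpa [List.getElem?_eq_getElem h] using hsome
      exact hs (hval ▸ List.getElem_mem h)
    have hlen : s.length = j := by omega
    rw [← hlen, hr', List.take_left]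
  · intro h
    have htake : t.take (j + 1) = t.take j ++ ['/'] := by
      rw [List.take_add_one, hjget]
      rfl
    rw [h, ← htake]
    exact List.take_prefix _ _

-- one table entry '/x/' matches iff x is exactly the first segment of the path
lemma pvEntryB (path p x : String) (t : List Char) (hcs : path.toList = '/' :: t)
    (hshape : p.toList = '/' :: (x.toList ++ ['/'])) (hx : '/' ∉ x.toList)
    (j : Nat) (hj : t.findIdx? (· == '/') = some j) :
    PySem.Str.startswith path p = (String.ofList (t.take j) == x) := by
  rw [Bool.eq_iff_iff, PySem.Str.startswith_eq, PySem.Chars.startswith_iff, beq_iff_eq,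
    String.ofList_eq, hcs, hshape, List.cons_prefix_cons]
  constructor
  · intro hpre
    exact ((pvTakeIff t x.toList hx j hj).1 hpre.2).symm
  · intro hk
    exact ⟨rfl, (pvTakeIff t x.toList hx j hj).2 hk.symm⟩

lemma pvScan_default (path : String) (l : List (String × String))
    (h : ∀ pn ∈ l, PySem.Str.startswith path pn.1 = false) :
    pvScanA l path = "the requested page" := by
  induction l with
  | nil => rfl
  | cons hd tl ih =>
    simp only [pvScanA, h hd List.mem_cons_self, Bool.false_eq_true, if_false]
    exact ih fun pn hpn => h pn (List.mem_cons_of_mem _ hpn)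

-- B's loop computes the name of the segment before the first '/', or the default if none
lemma pvLoop_spec (t acc : List Char) :
    pvSegLoop acc t =
      match t.findIdx? (· == '/') with
      | none => "the requested page"
      | some j => pvNameFor (String.ofList (acc ++ t.take j)) := by
  induction t generalizing acc with
  | nil => rfl
  | cons c cs ih =>
    rw [List.findIdx?_cons]
    by_cases hc : (c == '/') = true
    · simp only [pvSegLoop, hc, if_pos, List.take_zero, List.append_nil]
    · simp only [Bool.not_eq_true] at hc
      simp only [pvSegLoop, hc, Bool.false_eq_true, if_false, ih]
      cases hf : cs.findIdx? (· == '/') with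
      | none => rfl
      | some j =>
        simp only [Option.map_some, List.take_succ_cons, List.append_assoc,
          List.singleton_append]

-- ===== VERDICT (by name: the statement is the Claim_ definition above) =====
theorem get_module_name_py_spec : Claim_equal_get_module_name_py := by
  intro path _
  show get_module_name_py path = get_module_name_py_alt path
  unfold get_module_name_py get_module_name_py_alt
  rw [pvItems]
  by_cases hstart : PySem.Str.startswith path "/" = true
  · have h2 : PySem.Chars.startswith path.toList ['/'] = true := by
      rw [pvStartswithChar] at hstart; exact hstart
    obtain ⟨t, ht⟩ := (PySem.Chars.startswith_iff _ _).1 h2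
    have hcs : path.toList = '/' :: t := by simpa using ht.symm
    have hslice : (PySem.Str.slice path (some 1) none).toList = t := by
      rw [PySem.Str.toList_slice, PySem.Chars.slice_eq_listSlice,
        PySem.List.slice_from _ (by omega)]
      rw [hcs]
      rfl
    rw [if_pos hstart, hslice, pvLoop_spec]
    cases hj : t.findIdx? (· == '/') with
    | none =>
      have hnot : '/' ∉ t := by
        intro hm
        have := List.findIdx?_eq_none_iff.1 hj '/' hm
        simp at this
      apply pvScan_default
      intro pn hpn
      unfold pvPairs at hpn
      fin_cases hpn <;> exact pvEntry2a path _ t hcs (by decide) hnot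
    | some j =>
      show pvScanA pvPairs path = pvNameFor (String.ofList ([] ++ t.take j))
      rw [List.nil_append]
      simp only [pvPairs, pvScanA, pvNameFor]
      rw [pvEntryB path "/dashboard/" "dashboard" t hcs (by decide) (by decide) j hj]
      rw [pvEntryB path "/patients/" "patients" t hcs (by decide) (by decide) j hj]
      rw [pvEntryB path "/appointments/" "appointments" t hcs (by decide) (by decide) j hj]
      rw [pvEntryB path "/doctors/" "doctors" t hcs (by decide) (by decide) j hj]
      rw [pvEntryB path "/nurses/" "nurses" t hcs (by decide) (by decide) j hj]
      rw [pvEntryB path "/billing/" "billing" t hcs (by decide) (by decide) j hj]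
      rw [pvEntryB path "/pharmacy/" "pharmacy" t hcs (by decide) (by decide) j hj]
      rw [pvEntryB path "/laboratory/" "laboratory" t hcs (by decide) (by decide) j hj]
      rw [pvEntryB path "/radiology/" "radiology" t hcs (by decide) (by decide) j hj]
      rw [pvEntryB path "/emergency/" "emergency" t hcs (by decide) (by decide) j hj]
      rw [pvEntryB path "/opd/" "opd" t hcs (by decide) (by decide) j hj]
      rw [pvEntryB path "/ipd/" "ipd" t hcs (by decide) (by decide) j hj]
      rw [pvEntryB path "/surgery/" "surgery" t hcs (by decide) (by decide) j hj]
      rw [pvEntryB path "/staff/" "staff" t hcs (by decide) (by decide) j hj]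
      rw [pvEntryB path "/inventory/" "inventory" t hcs (by decide) (by decide) j hj]
      rw [pvEntryB path "/reports/" "reports" t hcs (by decide) (by decide) j hj]
      rw [pvEntryB path "/analytics/" "analytics" t hcs (by decide) (by decide) j hj]
      rw [pvEntryB path "/notifications/" "notifications" t hcs (by decide) (by decide) j hj]
  · have hstart' : PySem.Str.startswith path "/" = false := Bool.eq_false_iff.mpr hstart
    rw [if_neg hstart]
    apply pvScan_default
    intro pn hpn
    unfold pvPairs at hpn
    fin_cases hpn <;> exact pvEntry1 path _ hstart' (by decide)
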